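-- pv_equiv track=rewrite | github.com/sumithastir/Data-structure | day8-closest-minmax.py | solve
-- ===== SOURCE A (Python) =====
-- def solve(A):
--     min_val = A[0]
--     max_val = A[0]
--
--     for a in A:
--         min_val = min(min_val, a)
--         max_val = max(max_val, a)
--
--     N = len(A)
--     min_inx = max_inx = -1
--     ans = N
--
--     for i in range(0, N):
--         if min_val == A[i]:
--             min_inx = i
--
--             if max_inx != -1:
--                 ans = min(ans, min_inx - max_inx + 1)
--
--         if max_val == A[i]:
--             max_inx = i
--             if min_inx != -1:
--                 ans = min(ans, max_inx - min_inx + 1)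
--     return ans
-- ===== SOURCE B (Python) =====
-- def solve(A):
--     lo = min(A)
--     hi = max(A)
--     mins = [i for i, a in enumerate(A) if a == lo]
--     maxs = [i for i, a in enumerate(A) if a == hi]
--     return min(abs(i - j) + 1 for i in mins for j in maxs)
-- ===== Notes on version B (the rewrite author's own statement) =====
-- stated objective: alternative
-- what changed: Replaces the stateful single pass tracking last-seen min/max indices with: compute min/max via builtins, collect the occurrence-index lists of each, and take the minimum window |i-j|+1 over all cross pairs; trades the O(n) scan for a clearer pairwise minimum (worst case O(n^2) when extremes repeat).
-- outside the precondition, e.g. on solve([]): A raises IndexError, B raises ValueError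
import Mathlib
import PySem

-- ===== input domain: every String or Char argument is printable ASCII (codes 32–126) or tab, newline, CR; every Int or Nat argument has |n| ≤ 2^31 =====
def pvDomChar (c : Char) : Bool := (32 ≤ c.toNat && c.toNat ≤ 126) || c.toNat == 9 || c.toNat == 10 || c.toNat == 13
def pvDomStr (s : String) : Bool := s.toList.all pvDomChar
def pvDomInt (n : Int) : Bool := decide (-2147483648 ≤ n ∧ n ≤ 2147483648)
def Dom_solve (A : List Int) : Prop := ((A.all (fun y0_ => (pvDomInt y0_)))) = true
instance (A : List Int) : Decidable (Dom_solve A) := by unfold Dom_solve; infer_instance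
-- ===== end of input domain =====

-- B replaces A's stateful last-index scan by a pairwise minimum over the min/max occurrence-index lists (alternative decomposition, no speed claim).

-- ===== PORT A =====
-- loop body of A's second for-loop, transliterated statement by statement
def solveStep (A : List Int) (min_val max_val : Int) (s : Int × Int × Int) (i : Int) : Int × Int × Int :=
  let min_inx := s.1
  let max_inx := s.2.1
  let ans := s.2.2
  let ai := PySem.List.pyGetD A i 0      -- A[i]; i ∈ range(0,N) so in range
  let p1 : Int × Int :=
    if min_val = ai then
      (i, if max_inx ≠ -1 then min ans (i - max_inx + 1) else ans)
    else (min_inx, ans)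
  let p2 : Int × Int :=
    if max_val = ai then
      (i, if p1.1 ≠ -1 then min p1.2 (i - p1.1 + 1) else p1.2)
    else (max_inx, p1.2)
  (p1.1, p2.1, p2.2)

def solve (A : List Int) : Int :=
  let a0 := PySem.List.pyGetD A 0 0      -- A[0]; IndexError on [] — excluded by Pre_solve
  let mm := A.foldl (fun p a => (min p.1 a, max p.2 a)) (a0, a0)
  let min_val := mm.1
  let max_val := mm.2
  let N : Int := (A.length : Int)
  let st := (PySem.List.pyRange 0 N 1).foldl (solveStep A min_val max_val) (-1, -1, N)
  st.2.2

-- ===== PORT B =====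
def solve_alt (A : List Int) : Int :=
  let lo := (PySem.List.min? A (fun y => y)).getD 0    -- min(A); ValueError on [] — excluded by Pre_solve
  let hi := (PySem.List.max? A (fun y => y)).getD 0
  let mins := ((PySem.List.enumerate A 0).filter (fun p => p.2 == lo)).map (fun p => p.1)
  let maxs := ((PySem.List.enumerate A 0).filter (fun p => p.2 == hi)).map (fun p => p.1)
  (PySem.List.min? (mins.flatMap (fun i => maxs.map (fun j => |i - j| + 1))) (fun y => y)).getD 0

-- ===== PRECONDITION & SPEC =====
-- Pre_solve excludes only the empty list, on which A raises IndexError (A[0]) and B raises ValueError (min([])).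
def Pre_solve (A : List Int) : Prop := A ≠ []
instance (A : List Int) : Decidable (Pre_solve A) := by unfold Pre_solve; infer_instance
def pvWitness_solve : List Int := [1, 3, 2]

def Spec_solve (A : List Int) (out : Int) : Prop := out = solve_alt A
instance (A : List Int) (out : Int) : Decidable (Spec_solve A out) := by unfold Spec_solve; infer_instance

-- ===== CLAIM (what is proved, stated in full; the proofs are below) =====
def Claim_equal_solve : Prop := ∀ (A : List Int), Dom_solve A → Pre_solve A → Spec_solve A (solve A)

-- ===== LEMMAS AND PROOFS =====

-- m is A's "last index < k holding value v, else -1"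
def lastSpec (A : List Int) (v : Int) (k : Nat) (m : Int) : Prop :=
  (m = -1 ∧ ∀ t : Nat, t < k → A.getD t 0 ≠ v) ∨
  (∃ u : Nat, m = (u : Int) ∧ u < k ∧ A.getD u 0 = v ∧ ∀ t : Nat, u < t → t < k → A.getD t 0 ≠ v)

-- ans is the min window over lo/hi occurrence pairs below k, capped at len A
def ansSpec (A : List Int) (lo hi : Int) (k : Nat) (ans : Int) : Prop :=
  1 ≤ ans ∧ ans ≤ (A.length : Int) ∧
  (∀ i j : Nat, i < k → j < k → A.getD i 0 = lo → A.getD j 0 = hi →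
    ans ≤ |(i : Int) - (j : Int)| + 1) ∧
  (ans = (A.length : Int) ∨ ∃ i j : Nat, i < k ∧ j < k ∧ A.getD i 0 = lo ∧ A.getD j 0 = hi ∧
    ans = |(i : Int) - (j : Int)| + 1)

lemma lastSpec_self (A : List Int) (v : Int) (k : Nat) (h : A.getD k 0 = v) :
    lastSpec A v (k+1) (k : Int) := by
  exact Or.inr ⟨k, rfl, Nat.lt_succ_self k, h, fun t ht ht' => absurd ht (by omega)⟩

lemma lastSpec_skip (A : List Int) (v : Int) (k : Nat) (m : Int)
    (hs : lastSpec A v k m) (h : A.getD k 0 ≠ v) : lastSpec A v (k+1) m := by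
  rcases hs with ⟨hm, hall⟩ | ⟨u, hu, huk, huv, hlast⟩
  · refine Or.inl ⟨hm, fun t ht => ?_⟩
    rcases Nat.lt_succ_iff_lt_or_eq.mp ht with h' | h'
    · exact hall t h'
    · subst h'; exact h
  · refine Or.inr ⟨u, hu, by omega, huv, fun t ht ht' => ?_⟩
    rcases Nat.lt_succ_iff_lt_or_eq.mp ht' with h' | h'
    · exact hlast t ht h'
    · subst h'; exact h

lemma lastSpec_ge (A : List Int) (v : Int) (k : Nat) (m : Int)
    (hs : lastSpec A v k m) (j : Nat) (hj : j < k) (hjv : A.getD j 0 = v) :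
    ∃ u : Nat, m = (u : Int) ∧ j ≤ u ∧ u < k ∧ A.getD u 0 = v := by
  rcases hs with ⟨_, hall⟩ | ⟨u, hu, huk, huv, hlast⟩
  · exact absurd hjv (hall j hj)
  · refine ⟨u, hu, ?_, huk, huv⟩
    by_contra h
    exact hlast j (by omega) hj hjv

lemma lastSpec_elim_ne (A : List Int) (v : Int) (k : Nat) (m : Int)
    (hs : lastSpec A v k m) (hm : m ≠ -1) :
    ∃ u : Nat, m = (u : Int) ∧ u < k ∧ A.getD u 0 = v ∧
      ∀ t : Nat, u < t → t < k → A.getD t 0 ≠ v := by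
  rcases hs with ⟨h, _⟩ | h
  · exact absurd h hm
  · exact h

lemma lastSpec_none (A : List Int) (v : Int) (k : Nat)
    (hs : lastSpec A v k (-1)) : ∀ t : Nat, t < k → A.getD t 0 ≠ v := by
  rcases hs with ⟨_, h⟩ | ⟨u, hu, _⟩
  · exact h
  · exact absurd hu.symm (by omega)

-- the key inductive step
lemma step_inv (A : List Int) (lo hi : Int) (k : Nat) (s : Int × Int × Int)
    (hk : k < A.length)
    (h1 : lastSpec A lo k s.1) (h2 : lastSpec A hi k s.2.1)
    (h3 : ansSpec A lo hi k s.2.2) :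
    lastSpec A lo (k+1) (solveStep A lo hi s (k : Int)).1 ∧
    lastSpec A hi (k+1) (solveStep A lo hi s (k : Int)).2.1 ∧
    ansSpec A lo hi (k+1) (solveStep A lo hi s (k : Int)).2.2 := by
  obtain ⟨mi, xi, ans⟩ := s
  obtain ⟨hans1, hansN, hbnd, hcase⟩ := h3
  have hk1 : ((k : Int)) ≠ -1 := by omega
  simp only at h1 h2
  by_cases hL : lo = A.getD (k : Int).toNat 0
  all_goals by_cases hH : hi = A.getD (k : Int).toNat 0
  all_goals simp only [Int.toNat_natCast] at hL hH
  -- case A : A[k] = lo and A[k] = hi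
  · have ha1 : (1 : Int) ≤ (if xi ≠ -1 then min ans ((k : Int) - xi + 1) else ans) := by
      split_ifs with hxi
      · obtain ⟨u, hu, huk, _, _⟩ := lastSpec_elim_ne A hi k xi h2 hxi
        have : (1 : Int) ≤ (k : Int) - xi + 1 := by omega
        exact le_min hans1 this
      · exact hans1
    simp only [solveStep, PySem.List.pyGetD_natCast, if_pos hL, if_pos hH, if_pos hk1]
    refine ⟨lastSpec_self A lo k hL.symm, lastSpec_self A hi k hH.symm, ?_⟩
    have hmin1 : min (if xi ≠ -1 then min ans ((k : Int) - xi + 1) else ans)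
        ((k : Int) - (k : Int) + 1) = 1 := by
      rw [show ((k : Int) - (k : Int) + 1) = 1 by ring]
      exact min_eq_right ha1
    rw [hmin1]
    refine ⟨le_refl 1, by omega, ?_, ?_⟩
    · intro i j _ _ _ _
      have := abs_nonneg ((i : Int) - (j : Int))
      omega
    · refine Or.inr ⟨k, k, Nat.lt_succ_self k, Nat.lt_succ_self k, hL.symm, hH.symm, ?_⟩
      simp
  -- case B : A[k] = lo, A[k] ≠ hi
  · have hkhi : A.getD k 0 ≠ hi := fun h => hH h.symm
    simp only [solveStep, PySem.List.pyGetD_natCast, if_pos hL, if_neg hH]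
    refine ⟨lastSpec_self A lo k hL.symm, lastSpec_skip A hi k xi h2 hkhi, ?_⟩
    by_cases hxi : xi ≠ -1
    · obtain ⟨u, hu, huk, huv, _⟩ := lastSpec_elim_ne A hi k xi h2 hxi
      rw [if_pos hxi]
      refine ⟨le_min hans1 (by omega), min_le_of_left_le hansN, ?_, ?_⟩
      · intro i j hik hjk hil hjh
        have hjk' : j < k := by
          rcases Nat.lt_succ_iff_lt_or_eq.mp hjk with h | h
          · exact h
          · subst h; exact absurd hjh hkhi
        rcases Nat.lt_succ_iff_lt_or_eq.mp hik with hik' | hik'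
        · exact le_trans (min_le_left _ _) (hbnd i j hik' hjk' hil hjh)
        · obtain ⟨u', hu', hju', hu'k, _⟩ := lastSpec_ge A hi k xi h2 j hjk' hjh
          have habs : |(i : Int) - (j : Int)| = (i : Int) - (j : Int) := abs_of_nonneg (by omega)
          rw [habs]
          calc min ans ((k : Int) - xi + 1) ≤ (k : Int) - xi + 1 := min_le_right _ _
            _ ≤ (i : Int) - (j : Int) + 1 := by omega
      · rcases le_total ans ((k : Int) - xi + 1) with hle | hle
        · rw [min_eq_left hle]
          rcases hcase with h | ⟨i, j, hik, hjk, hil, hjh, h⟩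
          · exact Or.inl h
          · exact Or.inr ⟨i, j, by omega, by omega, hil, hjh, h⟩
        · rw [min_eq_right hle]
          refine Or.inr ⟨k, u, Nat.lt_succ_self k, by omega, hL.symm, huv, ?_⟩
          have : |(k : Int) - (u : Int)| = (k : Int) - (u : Int) := abs_of_nonneg (by omega)
          rw [this, hu]
    · rw [if_neg hxi]
      rw [not_ne_iff] at hxi
      subst hxi
      have hnone := lastSpec_none A hi k h2
      refine ⟨hans1, hansN, ?_, ?_⟩
      · intro i j hik hjk hil hjh
        have : j < k := by
          rcases Nat.lt_succ_iff_lt_or_eq.mp hjk with h | h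
          · exact h
          · subst h; exact absurd hjh hkhi
        exact absurd hjh (hnone j this)
      · rcases hcase with h | ⟨i, j, hik, hjk, hil, hjh, h⟩
        · exact Or.inl h
        · exact Or.inr ⟨i, j, by omega, by omega, hil, hjh, h⟩
  -- case C : A[k] ≠ lo, A[k] = hi
  · have hklo : A.getD k 0 ≠ lo := fun h => hL h.symm
    simp only [solveStep, PySem.List.pyGetD_natCast, if_neg hL, if_pos hH]
    refine ⟨lastSpec_skip A lo k mi h1 hklo, lastSpec_self A hi k hH.symm, ?_⟩
    by_cases hmi : mi ≠ -1
    · obtain ⟨u, hu, huk, huv, _⟩ := lastSpec_elim_ne A lo k mi h1 hmi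
      rw [if_pos hmi]
      refine ⟨le_min hans1 (by omega), min_le_of_left_le hansN, ?_, ?_⟩
      · intro i j hik hjk hil hjh
        have hik' : i < k := by
          rcases Nat.lt_succ_iff_lt_or_eq.mp hik with h | h
          · exact h
          · subst h; exact absurd hil hklo
        rcases Nat.lt_succ_iff_lt_or_eq.mp hjk with hjk' | hjk'
        · exact le_trans (min_le_left _ _) (hbnd i j hik' hjk' hil hjh)
        · obtain ⟨u', hu', hiu', hu'k, _⟩ := lastSpec_ge A lo k mi h1 i hik' hil
          have habs : |(i : Int) - (j : Int)| = (j : Int) - (i : Int) := by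
            rw [abs_sub_comm]; exact abs_of_nonneg (by omega)
          rw [habs]
          calc min ans ((k : Int) - mi + 1) ≤ (k : Int) - mi + 1 := min_le_right _ _
            _ ≤ (j : Int) - (i : Int) + 1 := by omega
      · rcases le_total ans ((k : Int) - mi + 1) with hle | hle
        · rw [min_eq_left hle]
          rcases hcase with h | ⟨i, j, hik, hjk, hil, hjh, h⟩
          · exact Or.inl h
          · exact Or.inr ⟨i, j, by omega, by omega, hil, hjh, h⟩
        · rw [min_eq_right hle]
          refine Or.inr ⟨u, k, by omega, Nat.lt_succ_self k, huv, hH.symm, ?_⟩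
          have : |(u : Int) - (k : Int)| = (k : Int) - (u : Int) := by
            rw [abs_sub_comm]; exact abs_of_nonneg (by omega)
          rw [this, hu]
    · rw [if_neg hmi]
      rw [not_ne_iff] at hmi
      subst hmi
      have hnone := lastSpec_none A lo k h1
      refine ⟨hans1, hansN, ?_, ?_⟩
      · intro i j hik hjk hil hjh
        have : i < k := by
          rcases Nat.lt_succ_iff_lt_or_eq.mp hik with h | h
          · exact h
          · subst h; exact absurd hil hklo
        exact absurd hil (hnone i this)
      · rcases hcase with h | ⟨i, j, hik, hjk, hil, hjh, h⟩
        · exact Or.inl h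
        · exact Or.inr ⟨i, j, by omega, by omega, hil, hjh, h⟩
  -- case D : neither
  · have hklo : A.getD k 0 ≠ lo := fun h => hL h.symm
    have hkhi : A.getD k 0 ≠ hi := fun h => hH h.symm
    simp only [solveStep, PySem.List.pyGetD_natCast, if_neg hL, if_neg hH]
    refine ⟨lastSpec_skip A lo k mi h1 hklo, lastSpec_skip A hi k xi h2 hkhi, ?_⟩
    refine ⟨hans1, hansN, ?_, ?_⟩
    · intro i j hik hjk hil hjh
      have hik' : i < k := by
        rcases Nat.lt_succ_iff_lt_or_eq.mp hik with h | h
        · exact h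
        · subst h; exact absurd hil hklo
      have hjk' : j < k := by
        rcases Nat.lt_succ_iff_lt_or_eq.mp hjk with h | h
        · exact h
        · subst h; exact absurd hjh hkhi
      exact hbnd i j hik' hjk' hil hjh
    · rcases hcase with h | ⟨i, j, hik, hjk, hil, hjh, h⟩
      · exact Or.inl h
      · exact Or.inr ⟨i, j, by omega, by omega, hil, hjh, h⟩

-- the loop of A, reified for induction
def loopA (A : List Int) (lo hi : Int) (k : Nat) : Int × Int × Int :=
  (PySem.List.pyRange 0 (k : Int) 1).foldl (solveStep A lo hi) (-1, -1, (A.length : Int))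

lemma loopA_inv (A : List Int) (lo hi : Int) (hne : A ≠ []) (k : Nat) (hk : k ≤ A.length) :
    lastSpec A lo k (loopA A lo hi k).1 ∧ lastSpec A hi k (loopA A lo hi k).2.1 ∧
    ansSpec A lo hi k (loopA A lo hi k).2.2 := by
  induction k with
  | zero =>
    have hlen : 0 < A.length := List.length_pos_of_ne_nil hne
    unfold loopA
    rw [show ((0 : Nat) : Int) = 0 from rfl, PySem.List.pyRange_one_eq_nil (le_refl 0)]
    refine ⟨Or.inl ⟨rfl, ?_⟩, Or.inl ⟨rfl, ?_⟩, ?_, ?_, ?_, ?_⟩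
    · intro t ht; exact absurd ht (by omega)
    · intro t ht; exact absurd ht (by omega)
    · simp only [List.foldl_nil]; omega
    · simp only [List.foldl_nil]; omega
    · intro i j hi0; exact absurd hi0 (by omega)
    · exact Or.inl rfl
  | succ k ih =>
    have hk' : k < A.length := by omega
    obtain ⟨H1, H2, H3⟩ := ih (by omega)
    have hrange : PySem.List.pyRange 0 ((k + 1 : Nat) : Int) 1 =
        PySem.List.pyRange 0 (k : Int) 1 ++ [(k : Int)] := by
      push_cast
      exact PySem.List.pyRange_one_succ_right (Int.natCast_nonneg k)
    unfold loopA
    rw [hrange, List.foldl_append, List.foldl_cons, List.foldl_nil]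
    exact step_inv A lo hi k _ hk' H1 H2 H3

-- B's candidate list, parametric in the two values
def cands (A : List Int) (lo hi : Int) : List Int :=
  ((((PySem.List.enumerate A 0).filter (fun p => p.2 == lo)).map (fun p => p.1)).flatMap
    (fun i => ((((PySem.List.enumerate A 0).filter (fun p => p.2 == hi)).map (fun p => p.1)).map
      (fun j => |i - j| + 1))))

lemma mem_cands (A : List Int) (lo hi c : Int) :
    c ∈ cands A lo hi ↔ ∃ i j : Nat, i < A.length ∧ j < A.length ∧
      A.getD i 0 = lo ∧ A.getD j 0 = hi ∧ c = |(i : Int) - (j : Int)| + 1 := by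
  unfold cands
  simp only [List.mem_flatMap, List.mem_map, List.mem_filter, PySem.List.mem_enumerate_iff,
    beq_iff_eq]
  constructor
  · rintro ⟨i, ⟨p, ⟨⟨k, hk, rfl⟩, hplo⟩, rfl⟩, c', ⟨q, ⟨⟨l, hl, rfl⟩, hqhi⟩, rfl⟩, rfl⟩
    refine ⟨k, l, hk, hl, ?_, ?_, ?_⟩
    · simpa [List.getD_eq_getElem, hk] using hplo
    · simpa [List.getD_eq_getElem, hl] using hqhi
    · push_cast; ring_nf
  · rintro ⟨i, j, hi, hj, hlo, hhi, rfl⟩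
    refine ⟨(i : Int), ⟨((0 : Int) + i, A[i]), ⟨⟨i, hi, rfl⟩, ?_⟩, by push_cast; ring⟩, ?_⟩
    · simpa [List.getD_eq_getElem, hi] using hlo
    · refine ⟨(j : Int), ⟨((0 : Int) + j, A[j]), ⟨⟨j, hj, rfl⟩, ?_⟩, by push_cast; ring⟩, rfl⟩
      simpa [List.getD_eq_getElem, hj] using hhi

lemma ansSpec_unique (A : List Int) (lo hi out : Int)
    (hlo : ∃ i : Nat, i < A.length ∧ A.getD i 0 = lo)
    (hhi : ∃ j : Nat, j < A.length ∧ A.getD j 0 = hi)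
    (h : ansSpec A lo hi A.length out) :
    (PySem.List.min? (cands A lo hi) (fun y => y)).getD 0 = out := by
  obtain ⟨i0, hi0, hlo0⟩ := hlo
  obtain ⟨j0, hj0, hhi0⟩ := hhi
  obtain ⟨h1, hN, hbnd, hcase⟩ := h
  have hc0 : (|(i0 : Int) - (j0 : Int)| + 1) ∈ cands A lo hi :=
    (mem_cands A lo hi _).mpr ⟨i0, j0, hi0, hj0, hlo0, hhi0, rfl⟩
  cases hmq : PySem.List.min? (cands A lo hi) (fun y => y) with
  | none =>
    rw [PySem.List.min?_eq_none_iff] at hmq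
    rw [hmq] at hc0
    simp at hc0
  | some m =>
    have hm_mem : m ∈ cands A lo hi := PySem.List.min?_mem hmq
    have hmin := PySem.List.min?_isMin hmq
    have hout_le : out ≤ m := by
      obtain ⟨i1, j1, hi1, hj1, hl, hh, rfl⟩ := (mem_cands A lo hi m).mp hm_mem
      exact hbnd i1 j1 hi1 hj1 hl hh
    have hle_out : m ≤ out := by
      rcases hcase with hEq | ⟨i1, j1, hi1, hj1, hl, hh, rfl⟩
      · obtain ⟨i1, j1, hi1, hj1, _, _, rfl⟩ := (mem_cands A lo hi m).mp hm_mem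
        have habs : |(i1 : Int) - (j1 : Int)| ≤ (A.length : Int) - 1 := by
          rw [abs_sub_le_iff]; omega
        omega
      · exact hmin _ ((mem_cands A lo hi _).mpr ⟨i1, j1, hi1, hj1, hl, hh, rfl⟩)
    simpa using le_antisymm hle_out hout_le

lemma foldl_pair_min_max (t : List Int) (p : Int × Int) :
    t.foldl (fun p a => (min p.1 a, max p.2 a)) p = (t.foldl min p.1, t.foldl max p.2) := by
  induction t generalizing p with
  | nil => rfl
  | cons y t ih => simp only [List.foldl_cons, ih]

lemma mem_getD_index (l : List Int) (v : Int) (hv : v ∈ l) :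
    ∃ i : Nat, i < l.length ∧ l.getD i 0 = v := by
  obtain ⟨n, hn, rfl⟩ := List.mem_iff_getElem.mp hv
  exact ⟨n, hn, List.getD_eq_getElem l 0 hn⟩

-- ===== VERDICT (by name: the statement is the Claim_ definition above) =====
theorem solve_spec : Claim_equal_solve := by
  intro A hdom hpre
  unfold Spec_solve
  obtain ⟨x, t, rfl⟩ : ∃ x t, A = x :: t := by
    cases A with
    | nil => exact absurd rfl hpre
    | cons x t => exact ⟨x, t, rfl⟩
  have hsolve : solve (x :: t) =
      (loopA (x :: t) (t.foldl min x) (t.foldl max x) (x :: t).length).2.2 := by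
    unfold solve loopA
    simp only [PySem.List.pyGetD_zero_cons, List.foldl_cons, foldl_pair_min_max,
      min_self, max_self]
  have halt : solve_alt (x :: t) =
      (PySem.List.min? (cands (x :: t) (t.foldl min x) (t.foldl max x)) (fun y => y)).getD 0 := by
    unfold solve_alt cands
    rw [PySem.List.min?_id_cons, PySem.List.max?_id_cons]
    simp only [Option.getD_some]
  have hlo_mem : t.foldl min x ∈ x :: t := by
    rcases PySem.List.foldl_min_mem t x with h | h
    · rw [h]; exact List.mem_cons_self
    · exact List.mem_cons_of_mem x h
  have hhi_mem : t.foldl max x ∈ x :: t := by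
    rcases PySem.List.foldl_max_mem t x with h | h
    · rw [h]; exact List.mem_cons_self
    · exact List.mem_cons_of_mem x h
  obtain ⟨_, _, H3⟩ := loopA_inv (x :: t) (t.foldl min x) (t.foldl max x) hpre
    (x :: t).length (le_refl _)
  rw [hsolve, halt]
  exact (ansSpec_unique (x :: t) (t.foldl min x) (t.foldl max x) _
    (mem_getD_index _ _ hlo_mem) (mem_getD_index _ _ hhi_mem) H3).symm
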